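-- pv_equiv track=rewrite | github.com/kttt294/p2025 | train.py | action_to_tuple
-- ===== SOURCE A (Python) =====
-- def action_to_tuple(idx, N):
--     # idx -> (x, y, n) với n=2..N
--     count = 0
--     for n in range(2, N+1):
--         for y in range(N-n+1):
--             for x in range(N-n+1):
--                 if count == idx:
--                     return (x, y, n)
--                 count += 1
--     raise ValueError('Invalid action idx')
-- ===== SOURCE B (Python) =====
-- def action_to_tuple(idx, N):
--     # idx -> (x, y, n) with n=2..N: skip whole (N-n+1)^2 blocks, then divmod
--     for n in range(2, N + 1):
--         side = N - n + 1
--         block = side * side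
--         if 0 <= idx < block:
--             y, x = divmod(idx, side)
--             return (x, y, n)
--         idx -= block
--     raise ValueError('Invalid action idx')
-- ===== Notes on version B (the rewrite author's own statement) =====
-- stated objective: faster
-- what changed: Instead of counting every cell one by one through three nested loops until count==idx, B subtracts the (N-n+1)^2 block size per n and recovers (y,x) with one divmod inside the matching block.
import Mathlib
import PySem

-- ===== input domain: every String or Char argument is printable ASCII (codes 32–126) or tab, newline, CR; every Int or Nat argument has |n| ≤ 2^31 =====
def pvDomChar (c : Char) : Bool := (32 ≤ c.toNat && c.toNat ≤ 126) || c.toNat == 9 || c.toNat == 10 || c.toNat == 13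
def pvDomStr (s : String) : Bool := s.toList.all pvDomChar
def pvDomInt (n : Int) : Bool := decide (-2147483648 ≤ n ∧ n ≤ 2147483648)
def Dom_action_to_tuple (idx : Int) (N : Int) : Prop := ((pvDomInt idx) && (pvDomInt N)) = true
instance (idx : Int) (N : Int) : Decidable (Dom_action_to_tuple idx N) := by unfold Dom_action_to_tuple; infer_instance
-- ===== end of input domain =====

-- B replaces A's cell-by-cell counting (three nested loops) by per-n block subtraction plus one divmod: asymptotically faster.
-- Both Pythons raise ValueError on the same inputs (idx < 0 or idx beyond the last block); Pre_ excludes exactly those.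

-- ===== PORT A =====
-- Each Python for-loop is recursion on its trip count (the fuel Nat), carrying the loop
-- variable and 'count'; 'return (x, y, n)' is the (some [x, y, n], count) early exit,
-- propagated outward exactly as Python's return unwinds the nested loops.

-- for x in range(N-n+1): if count == idx: return (x, y, n); count += 1
def aLoopX (idx n y : Int) : Nat → Int → Int → Option (List Int) × Int
  | 0, _, count => (none, count)
  | fuel + 1, x, count =>
    if count = idx then (some [x, y, n], count)
    else aLoopX idx n y fuel (x + 1) (count + 1)

-- for y in range(N-n+1): <x-loop>
def aLoopY (idx N n : Int) : Nat → Int → Int → Option (List Int) × Int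
  | 0, _, count => (none, count)
  | fuel + 1, y, count =>
    match aLoopX idx n y (N - n + 1).toNat 0 count with
    | (some r, c) => (some r, c)
    | (none, c) => aLoopY idx N n fuel (y + 1) c

-- for n in range(2, N+1): <y-loop>
def aLoopN (idx N : Int) : Nat → Int → Int → Option (List Int) × Int
  | 0, _, count => (none, count)
  | fuel + 1, n, count =>
    match aLoopY idx N n (N - n + 1).toNat 0 count with
    | (some r, c) => (some r, c)
    | (none, c) => aLoopN idx N fuel (n + 1) c

def action_to_tuple (idx : Int) (N : Int) : List Int :=
  ((aLoopN idx N (N + 1 - 2).toNat 2 0).1).getD []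
  -- none = Python's 'raise ValueError' — excluded by Pre_

-- ===== PORT B =====
-- for n in range(2, N+1), recursion on the trip count, 'idx' mutated down each step
def altLoop (N : Int) : Nat → Int → Int → List Int
  | 0, _, _ => []  -- Python's 'raise ValueError' — excluded by Pre_
  | fuel + 1, n, idx =>
    let side := N - n + 1
    let block := side * side
    if 0 ≤ idx ∧ idx < block then
      -- y, x = divmod(idx, side)  (side ≠ 0 here since 0 ≤ idx < side*side)
      [PySem.Int.mod idx side, PySem.Int.floordiv idx side, n]
    else altLoop N fuel (n + 1) (idx - block)

def action_to_tuple_alt (idx : Int) (N : Int) : List Int :=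
  altLoop N (N + 1 - 2).toNat 2 idx

-- ===== PRECONDITION & SPEC =====
-- Exactly the inputs where Python A returns: 0 ≤ idx below the total cell count
-- Σ_{n=2}^{N} (N-n+1)^2 = (N-1)·N·(2N-1)/6 (on both programs' raising inputs A raises ValueError).
def Pre_action_to_tuple (idx : Int) (N : Int) : Prop :=
  0 ≤ idx ∧ 6 * idx < (N - 1) * N * (2 * N - 1)
instance (idx : Int) (N : Int) : Decidable (Pre_action_to_tuple idx N) := by
  unfold Pre_action_to_tuple; infer_instance

def pvWitness_action_to_tuple : Int × Int := (3, 3)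

def Spec_action_to_tuple (idx : Int) (N : Int) (out : List Int) : Prop := out = action_to_tuple_alt idx N
instance (idx : Int) (N : Int) (out : List Int) : Decidable (Spec_action_to_tuple idx N out) := by
  unfold Spec_action_to_tuple; infer_instance

-- ===== CLAIM (what is proved, stated in full; the proofs are below) =====
def Claim_equal_action_to_tuple : Prop := ∀ (idx : Int) (N : Int), Dom_action_to_tuple idx N → Pre_action_to_tuple idx N → Spec_action_to_tuple idx N (action_to_tuple idx N)

-- ===== LEMMAS AND PROOFS =====

-- sum of the remaining block sizes (proof-only bookkeeping for the main induction)
def totalFrom (N : Int) : Nat → Int → Int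
  | 0, _ => 0
  | m + 1, n => (N - n + 1) * (N - n + 1) + totalFrom N m (n + 1)

theorem totalFrom_closed (N : Int) (m : Nat) :
    ∀ n : Int, n + m = N + 1 →
      6 * totalFrom N m n = (m : Int) * (m + 1) * (2 * m + 1) := by
  induction m with
  | zero => intro n hn; simp [totalFrom]
  | succ m ih =>
    intro n hn
    have hside : N - n + 1 = (m : Int) + 1 := by push_cast at hn; omega
    have ihn := ih (n + 1) (by push_cast at hn ⊢; omega)
    rw [totalFrom, hside]
    push_cast
    linear_combination ihn

-- x-loop, no hit in this row: count advances by the fuel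
theorem aLoopX_miss (idx n y : Int) (fuel : Nat) :
    ∀ x count : Int, (idx < count ∨ count + fuel ≤ idx) →
      aLoopX idx n y fuel x count = (none, count + fuel) := by
  induction fuel with
  | zero => intro x count _; simp [aLoopX]
  | succ fuel ih =>
    intro x count h
    rw [aLoopX, if_neg (by push_cast at h; omega)]
    rw [ih (x + 1) (count + 1) (by push_cast at h ⊢; omega)]
    congr 1
    push_cast
    omega

-- x-loop, hit: returns x advanced by idx - count, count frozen at idx
theorem aLoopX_hit (idx n y : Int) (fuel : Nat) :
    ∀ x count : Int, count ≤ idx → idx < count + fuel →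
      aLoopX idx n y fuel x count = (some [x + (idx - count), y, n], idx) := by
  induction fuel with
  | zero => intro x count h1 h2; omega
  | succ fuel ih =>
    intro x count h1 h2
    rw [aLoopX]
    by_cases hc : count = idx
    · rw [if_pos hc, hc]
      norm_num
    · rw [if_neg hc]
      rw [ih (x + 1) (count + 1) (by omega) (by push_cast at h2 ⊢; omega),
        show x + 1 + (idx - (count + 1)) = x + (idx - count) from by ring]

-- y-loop, no hit: count advances by fuel rows of width s
theorem aLoopY_miss (idx N n : Int) (s : Nat) (hs : N - n + 1 = (s : Int)) (fuel : Nat) :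
    ∀ y count : Int, (idx < count ∨ count + (fuel : Int) * s ≤ idx) →
      aLoopY idx N n fuel y count = (none, count + (fuel : Int) * s) := by
  induction fuel with
  | zero => intro y count _; simp [aLoopY]
  | succ fuel ih =>
    intro y count h
    have htn : (N - n + 1).toNat = s := by omega
    have hexp : ((fuel : Int) + 1) * s = (fuel : Int) * s + s := by ring
    have hnn : 0 ≤ (fuel : Int) * (s : Int) := by positivity
    rw [aLoopY, htn]
    rw [aLoopX_miss idx n y s 0 count (by push_cast at h; omega)]
    show aLoopY idx N n fuel (y + 1) (count + s) = _
    rw [ih (y + 1) (count + s) (by push_cast at h ⊢; omega)]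
    congr 1
    push_cast
    omega

-- y-loop, hit: column is mod, row is the start y plus floordiv
theorem aLoopY_hit (idx N n : Int) (s : Nat) (hs : N - n + 1 = (s : Int)) (fuel : Nat) :
    ∀ y count : Int, count ≤ idx → idx < count + (fuel : Int) * s →
      aLoopY idx N n fuel y count
        = (some [PySem.Int.mod (idx - count) s, y + PySem.Int.floordiv (idx - count) s, n], idx) := by
  induction fuel with
  | zero => intro y count h1 h2; push_cast at h2; omega
  | succ fuel ih =>
    intro y count h1 h2
    have htn : (N - n + 1).toNat = s := by omega
    have hexp : ((fuel : Int) + 1) * s = (fuel : Int) * s + s := by ring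
    have hspos : 0 < (s : Int) := by
      rcases Nat.eq_zero_or_pos s with h0 | h0
      · exfalso; subst h0; simp at h2; omega
      · exact_mod_cast h0
    rw [aLoopY, htn]
    by_cases hrow : idx < count + s
    · rw [aLoopX_hit idx n y s 0 count h1 hrow]
      have hq : PySem.Int.floordiv (idx - count) s = 0 := by
        rw [PySem.Int.floordiv_eq_iff_of_pos hspos]
        constructor <;> omega
      have hm : PySem.Int.mod (idx - count) s = idx - count := by
        have hfm := PySem.Int.floordiv_mul_add_mod (idx - count) s
        rw [hq] at hfm; omega
      rw [hq, hm]
      norm_num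
    · rw [aLoopX_miss idx n y s 0 count (by omega)]
      show aLoopY idx N n fuel (y + 1) (count + s) = _
      rw [ih (y + 1) (count + s) (by omega) (by push_cast at h2 ⊢; omega)]
      have hr0 := PySem.Int.mod_nonneg (idx - (count + s)) hspos
      have hrs := PySem.Int.mod_lt (idx - (count + s)) hspos
      have hfm := PySem.Int.floordiv_mul_add_mod (idx - (count + s)) s
      have hq : PySem.Int.floordiv (idx - count) s
          = PySem.Int.floordiv (idx - (count + s)) s + 1 := by
        rw [PySem.Int.floordiv_eq_iff_of_pos hspos]
        constructor
        · nlinarith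
        · nlinarith
      have hm : PySem.Int.mod (idx - count) s = PySem.Int.mod (idx - (count + s)) s := by
        have hfm2 := PySem.Int.floordiv_mul_add_mod (idx - count) s
        rw [hq] at hfm2
        nlinarith
      rw [hq, hm,
        show y + 1 + PySem.Int.floordiv (idx - (count + (s : Int))) s
            = y + (PySem.Int.floordiv (idx - (count + (s : Int))) s + 1) from by ring]

-- main loop: A's n-loop started at 'count' computes exactly B's loop on idx - count
theorem main_loop (idx N : Int) (m : Nat) :
    ∀ n count : Int, n + m = N + 1 → count ≤ idx → idx - count < totalFrom N m n →
      aLoopN idx N m n count = (some (altLoop N m n (idx - count)), idx) := by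
  induction m with
  | zero =>
    intro n count hm hc hlt
    simp [totalFrom] at hlt
    omega
  | succ m ih =>
    intro n count hm hc hlt
    have hn : n ≤ N := by push_cast at hm; omega
    obtain ⟨s, hs⟩ : ∃ s : Nat, N - n + 1 = (s : Int) := ⟨(N - n + 1).toNat, by omega⟩
    have htn : (N - n + 1).toNat = s := by omega
    rw [totalFrom, hs] at hlt
    rw [aLoopN, htn, altLoop]
    simp only [hs]
    by_cases hin : idx - count < (s : Int) * s
    · rw [aLoopY_hit idx N n s hs s 0 count hc (by omega)]
      rw [if_pos ⟨by omega, by omega⟩, zero_add]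
    · rw [aLoopY_miss idx N n s hs s 0 count (by omega)]
      have hnn : 0 ≤ (s : Int) * (s : Int) := by positivity
      show aLoopN idx N m (n + 1) (count + (s : Int) * s) = _
      rw [ih (n + 1) (count + (s : Int) * s) (by push_cast at hm ⊢; omega) (by omega) (by omega)]
      rw [if_neg (by omega),
        show idx - (count + (s : Int) * s) = idx - count - (s : Int) * s from by ring]

-- ===== VERDICT (by name: the statement is the Claim_ definition above) =====
theorem action_to_tuple_spec : Claim_equal_action_to_tuple := by
  intro idx N _ hpre
  obtain ⟨h0, hlt⟩ := hpre
  have hN2 : 2 ≤ N := by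
    by_contra hN
    by_cases h0' : N ≤ 0
    · have hp : 0 ≤ N * (2 * N - 1) := by nlinarith
      have hkey : 0 ≤ (1 - N) * (N * (2 * N - 1)) := mul_nonneg (by omega) hp
      nlinarith [hkey]
    · interval_cases N
      omega
  obtain ⟨m, hm⟩ : ∃ m : Nat, (N + 1 - 2 : Int) = (m : Int) := ⟨(N - 1).toNat, by omega⟩
  have htn : (N + 1 - 2).toNat = m := by omega
  have hclosed := totalFrom_closed N m 2 (by omega)
  have heq : (m : Int) * ((m : Int) + 1) * (2 * (m : Int) + 1) = (N - 1) * N * (2 * N - 1) := by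
    have hmN : (m : Int) = N - 1 := by omega
    rw [hmN]; ring
  have htot : idx - 0 < totalFrom N m 2 := by
    have : 6 * idx < 6 * totalFrom N m 2 := by rw [hclosed, heq]; exact hlt
    omega
  have hml := main_loop idx N m 2 0 (by omega) h0 htot
  unfold Spec_action_to_tuple action_to_tuple action_to_tuple_alt
  rw [htn, hml, show idx - 0 = idx from by ring]
  rfl
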